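-- pv_equiv track=rewrite | github.com/MichaelWehar/FourCornersProblem | python/lemma_2_case_1011_wip.py | createNextDownMap
-- ===== SOURCE A (Python) =====
-- def createNextDownMap(m, n, matrix):
--     nextOneDown = [None for _ in range(m * n)]
--     for j in range(n):
--         foundOneYet = False
--         prevEntry = [None, None]
--         for i in range(m):
--             nextOneDown[i * n + j] = -1
--             if matrix[i][j] == True:
--                 if foundOneYet:
--                     prevRowIndex = prevEntry[0]
--                     prevColIndex = prevEntry[1]
--                     nextOneDown[prevRowIndex * n + prevColIndex] = i
--                     prevEntry = [i, j]
--                 else: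
--                     foundOneYet = True
--                     prevEntry = [i, j]
--     return nextOneDown
-- ===== SOURCE B (Python) =====
-- def createNextDownMap(m, n, matrix):
--     nextOneDown = [None] * (m * n)
--     for j in range(n):
--         nextBelow = -1
--         for i in range(m - 1, -1, -1):
--             if matrix[i][j] == True:
--                 nextOneDown[i * n + j] = nextBelow
--                 nextBelow = i
--             else:
--                 nextOneDown[i * n + j] = -1
--     return nextOneDown
-- ===== Notes on version B (the rewrite author's own statement) =====
-- stated objective: simpler
-- what changed: Each column is scanned bottom-up with one running nextBelow integer that lets every cell's next-True-below be written directly, replacing A's top-down pass that remembers the previous True cell in a [row,col] list and patches it retroactively when the next True appears.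
import Mathlib
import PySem

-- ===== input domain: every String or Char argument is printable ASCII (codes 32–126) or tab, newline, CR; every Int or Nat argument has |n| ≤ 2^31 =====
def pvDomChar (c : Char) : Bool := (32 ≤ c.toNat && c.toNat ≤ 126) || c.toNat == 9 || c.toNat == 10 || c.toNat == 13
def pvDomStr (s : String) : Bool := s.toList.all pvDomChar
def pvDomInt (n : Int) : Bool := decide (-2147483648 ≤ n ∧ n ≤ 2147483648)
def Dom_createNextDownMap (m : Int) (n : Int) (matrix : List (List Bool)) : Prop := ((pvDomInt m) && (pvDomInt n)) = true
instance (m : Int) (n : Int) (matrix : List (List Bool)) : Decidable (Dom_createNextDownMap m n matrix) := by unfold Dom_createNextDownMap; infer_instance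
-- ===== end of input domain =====

-- B replaces A's top-down deferred patching of the previous True cell by a bottom-up
-- column scan that records each cell's next-True-below directly (objective: simpler).

-- ===== PORT A =====
-- A's inner loop body: set cell (i,j) to -1, then on a True cell patch the previously
-- remembered True cell of this column; state = (nextOneDown, foundOneYet, prevEntry).
def pvStepA (n j : Int) (matrix : List (List Bool)) (st : List (Option Int) × Bool × Option (Int × Int)) (i : Int) : List (Option Int) × Bool × Option (Int × Int) :=
  let arr := st.1.set (i * n + j).toNat (some (-1))
  if PySem.List.pyGetD (PySem.List.pyGetD matrix i []) j false = true then
    if st.2.1 = true then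
      match st.2.2 with
      | some pe => (arr.set (pe.1 * n + pe.2).toNat (some i), true, some (i, j))
      | none => (arr, true, some (i, j))   -- unreachable: foundOneYet → prevEntry is set
    else (arr, true, some (i, j))
  else (arr, st.2.1, st.2.2)

def createNextDownMap (m : Int) (n : Int) (matrix : List (List Bool)) : List (Option Int) :=
  (PySem.List.pyRange 0 n 1).foldl
    (fun nextOneDown j => ((PySem.List.pyRange 0 m 1).foldl (pvStepA n j matrix) (nextOneDown, false, none)).1)
    (List.replicate (m * n).toNat none)

-- ===== PORT B =====
-- B's inner loop body: write the running next-True-below (or -1) directly; state = (nextOneDown, nextBelow).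
def pvStepB (n j : Int) (matrix : List (List Bool)) (st : List (Option Int) × Int) (i : Int) : List (Option Int) × Int :=
  if PySem.List.pyGetD (PySem.List.pyGetD matrix i []) j false = true then
    (st.1.set (i * n + j).toNat (some st.2), i)
  else (st.1.set (i * n + j).toNat (some (-1)), st.2)

def createNextDownMap_alt (m : Int) (n : Int) (matrix : List (List Bool)) : List (Option Int) :=
  (PySem.List.pyRange 0 n 1).foldl
    (fun nextOneDown j => ((PySem.List.pyRange (m - 1) (-1) (-1)).foldl (pvStepB n j matrix) (nextOneDown, -1)).1)
    (List.replicate (m * n).toNat none)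

-- ===== PRECONDITION & SPEC =====
-- Pre_ excludes exactly the inputs on which the Python A raises IndexError
-- (some accessed cell matrix[i][j], 0 ≤ i < m, 0 ≤ j < n, does not exist).
-- The two (total) ports agree on every input, so the proof below does not need Pre_.
def Pre_createNextDownMap (m : Int) (n : Int) (matrix : List (List Bool)) : Prop :=
  m ≤ 0 ∨ n ≤ 0 ∨ (m ≤ (matrix.length : Int) ∧ ∀ row ∈ matrix.take m.toNat, n ≤ (row.length : Int))
instance (m : Int) (n : Int) (matrix : List (List Bool)) : Decidable (Pre_createNextDownMap m n matrix) := by unfold Pre_createNextDownMap; infer_instance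

def pvWitness_createNextDownMap : Int × Int × List (List Bool) := (2, 2, [[true, false], [true, true]])

def Spec_createNextDownMap (m : Int) (n : Int) (matrix : List (List Bool)) (out : List (Option Int)) : Prop := out = createNextDownMap_alt m n matrix
instance (m : Int) (n : Int) (matrix : List (List Bool)) (out : List (Option Int)) : Decidable (Spec_createNextDownMap m n matrix out) := by unfold Spec_createNextDownMap; infer_instance

-- ===== CLAIM (what is proved, stated in full; the proofs are below) =====
def Claim_equal_createNextDownMap : Prop := ∀ (m : Int) (n : Int) (matrix : List (List Bool)), Dom_createNextDownMap m n matrix → Pre_createNextDownMap m n matrix → Spec_createNextDownMap m n matrix (createNextDownMap m n matrix)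

-- ===== LEMMAS AND PROOFS =====

-- B's column pass, abstracted: bottom-up over the rows L = foldr over the ascending rows.
def pvColB (n j : Int) (matrix : List (List Bool)) (L : List Int) (arr : List (Option Int)) : List (Option Int) × Int :=
  L.foldr (fun i st => pvStepB n j matrix st i) (arr, -1)

lemma pvColB_nil (n j : Int) (matrix : List (List Bool)) (arr : List (Option Int)) :
    pvColB n j matrix [] arr = (arr, -1) := rfl

lemma pvColB_cons (n j : Int) (matrix : List (List Bool)) (i : Int) (L : List Int) (arr : List (Option Int)) :
    pvColB n j matrix (i :: L) arr = pvStepB n j matrix (pvColB n j matrix L arr) i := rfl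

-- one-step characterizations of A's and B's loop bodies
lemma pvStepA_true_found (n j : Int) (matrix : List (List Bool)) (arr : List (Option Int)) (p pc i : Int)
    (hg : PySem.List.pyGetD (PySem.List.pyGetD matrix i []) j false = true) :
    pvStepA n j matrix (arr, true, some (p, pc)) i
      = ((arr.set (i * n + j).toNat (some (-1))).set (p * n + pc).toNat (some i), true, some (i, j)) := by
  simp [pvStepA, hg]

lemma pvStepA_true_notfound (n j : Int) (matrix : List (List Bool)) (arr : List (Option Int)) (i : Int)
    (hg : PySem.List.pyGetD (PySem.List.pyGetD matrix i []) j false = true) :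
    pvStepA n j matrix (arr, false, none) i
      = (arr.set (i * n + j).toNat (some (-1)), true, some (i, j)) := by
  simp [pvStepA, hg]

lemma pvStepA_false (n j : Int) (matrix : List (List Bool)) (arr : List (Option Int)) (f : Bool) (pe : Option (Int × Int)) (i : Int)
    (hg : ¬ PySem.List.pyGetD (PySem.List.pyGetD matrix i []) j false = true) :
    pvStepA n j matrix (arr, f, pe) i = (arr.set (i * n + j).toNat (some (-1)), f, pe) := by
  simp [pvStepA, hg]

lemma pvStepB_true (n j : Int) (matrix : List (List Bool)) (st : List (Option Int) × Int) (i : Int)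
    (hg : PySem.List.pyGetD (PySem.List.pyGetD matrix i []) j false = true) :
    pvStepB n j matrix st i = (st.1.set (i * n + j).toNat (some st.2), i) := by
  simp [pvStepB, hg]

lemma pvStepB_false (n j : Int) (matrix : List (List Bool)) (st : List (Option Int) × Int) (i : Int)
    (hg : ¬ PySem.List.pyGetD (PySem.List.pyGetD matrix i []) j false = true) :
    pvStepB n j matrix st i = (st.1.set (i * n + j).toNat (some (-1)), st.2) := by
  simp [pvStepB, hg]

-- setting an element to the value it already holds is a no-op
lemma set_self_eq (l : List (Option Int)) (a : Nat) (x : Option Int) (h : l[a]? = some x) :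
    l.set a x = l := by
  apply List.ext_getElem?
  intro k
  by_cases hk : a = k
  · subst hk
    have hlt := (List.getElem?_eq_some_iff.mp h).1
    rw [List.getElem?_eq_getElem hlt] at h
    simp [hlt]
    exact (Option.some.inj h).symm
  · simp [List.getElem?_set_ne hk]

-- frame rule: a set at an index no row of L writes commutes out of B's column pass
lemma pvColB_set_comm (n j : Int) (matrix : List (List Bool)) (L : List Int)
    (arr : List (Option Int)) (k : Nat) (v : Option Int)
    (hk : ∀ i ∈ L, (i * n + j).toNat ≠ k) :
    pvColB n j matrix L (arr.set k v) = ((pvColB n j matrix L arr).1.set k v, (pvColB n j matrix L arr).2) := by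
  induction L with
  | nil => simp [pvColB_nil]
  | cons i L ih =>
    have hi : (i * n + j).toNat ≠ k := hk i (by simp)
    rw [pvColB_cons, pvColB_cons, ih (fun i' hi' => hk i' (by simp [hi']))]
    unfold pvStepB
    split <;> simp [List.set_comm _ _ hi]

-- A's column pass in the found state (prevEntry = (p, j), cell p currently -1)
-- equals B's column pass followed by patching cell p with B's running nextBelow.
lemma colA_found (n j : Int) (matrix : List (List Bool)) (L : List Int) :
    ∀ (arr : List (Option Int)) (p : Int),
    (∀ i ∈ L, (i * n + j).toNat ≠ (p * n + j).toNat) →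
    L.Pairwise (fun a b => (a * n + j).toNat ≠ (b * n + j).toNat) →
    (arr[(p * n + j).toNat]? = some (some (-1)) ∨ arr.length ≤ (p * n + j).toNat) →
    (L.foldl (pvStepA n j matrix) (arr, true, some (p, j))).1
      = (pvColB n j matrix L arr).1.set (p * n + j).toNat (some (pvColB n j matrix L arr).2) := by
  induction L with
  | nil =>
    intro arr p _ _ hp
    rcases hp with hp | hp
    · exact (set_self_eq arr _ _ hp).symm
    · exact (List.set_eq_of_length_le hp).symm
  | cons i L ih =>
    intro arr p hdist hpair hp
    have hip : (i * n + j).toNat ≠ (p * n + j).toNat := hdist i (by simp)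
    have hLp : ∀ i' ∈ L, (i' * n + j).toNat ≠ (p * n + j).toNat := fun i' h => hdist i' (by simp [h])
    have hLi : ∀ i' ∈ L, (i' * n + j).toNat ≠ (i * n + j).toNat := by
      intro i' h
      exact fun he => (List.pairwise_cons.mp hpair).1 i' h he.symm
    have hpair' := (List.pairwise_cons.mp hpair).2
    rw [List.foldl_cons, pvColB_cons]
    by_cases hg : PySem.List.pyGetD (PySem.List.pyGetD matrix i []) j false = true
    · rw [pvStepA_true_found n j matrix arr p j i hg, pvStepB_true n j matrix _ i hg]
      set arr1 := arr.set (i * n + j).toNat (some (-1)) with harr1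
      set arr2 := arr1.set (p * n + j).toNat (some i) with harr2
      have hp2 : arr2[(i * n + j).toNat]? = some (some (-1)) ∨ arr2.length ≤ (i * n + j).toNat := by
        by_cases hlen : (i * n + j).toNat < arr.length
        · left
          rw [harr2, List.getElem?_set_ne hip.symm, harr1, List.getElem?_set_self]
          simp [hlen]
        · right
          simp [arr2, arr1]; omega
      rw [ih arr2 i hLi hpair' hp2]
      rw [harr2, harr1,
          pvColB_set_comm n j matrix L _ _ _ hLp,
          pvColB_set_comm n j matrix L _ _ _ hLi]
      simp only
      rw [List.set_comm _ _ hip, List.set_set]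
      exact List.set_comm _ _ (Ne.symm hip)
    · rw [pvStepA_false n j matrix arr true (some (p, j)) i hg, pvStepB_false n j matrix _ i hg]
      set arr1 := arr.set (i * n + j).toNat (some (-1)) with harr1
      have hp1 : arr1[(p * n + j).toNat]? = some (some (-1)) ∨ arr1.length ≤ (p * n + j).toNat := by
        rcases hp with hp | hp
        · left; rw [harr1, List.getElem?_set_ne hip]; exact hp
        · right; simpa [arr1] using hp
      rw [ih arr1 p hLp hpair' hp1]
      rw [harr1, pvColB_set_comm n j matrix L _ _ _ hLi]

-- A's column pass from the initial (not-found) state equals B's column pass.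
lemma colA_notfound (n j : Int) (matrix : List (List Bool)) (L : List Int) :
    ∀ (arr : List (Option Int)),
    L.Pairwise (fun a b => (a * n + j).toNat ≠ (b * n + j).toNat) →
    (L.foldl (pvStepA n j matrix) (arr, false, none)).1 = (pvColB n j matrix L arr).1 := by
  induction L with
  | nil => intro arr _; rfl
  | cons i L ih =>
    intro arr hpair
    have hLi : ∀ i' ∈ L, (i' * n + j).toNat ≠ (i * n + j).toNat := by
      intro i' h
      exact fun he => (List.pairwise_cons.mp hpair).1 i' h he.symm
    have hpair' := (List.pairwise_cons.mp hpair).2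
    rw [List.foldl_cons, pvColB_cons]
    by_cases hg : PySem.List.pyGetD (PySem.List.pyGetD matrix i []) j false = true
    · rw [pvStepA_true_notfound n j matrix arr i hg, pvStepB_true n j matrix _ i hg]
      set arr1 := arr.set (i * n + j).toNat (some (-1)) with harr1
      have hp1 : arr1[(i * n + j).toNat]? = some (some (-1)) ∨ arr1.length ≤ (i * n + j).toNat := by
        by_cases hlen : (i * n + j).toNat < arr.length
        · left; rw [harr1, List.getElem?_set_self]; simp [hlen]
        · right; simp [arr1]; omega
      rw [colA_found n j matrix L arr1 i hLi hpair' hp1]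
      rw [harr1, pvColB_set_comm n j matrix L _ _ _ hLi]
      simp only
      rw [List.set_set]
    · rw [pvStepA_false n j matrix arr false none i hg, pvStepB_false n j matrix _ i hg]
      rw [ih _ hpair']
      rw [pvColB_set_comm n j matrix L _ _ _ hLi]

-- the row indices of one column write pairwise-distinct flat indices (0 ≤ j < n)
lemma pyRange_rows_pairwise (m n j : Int) (hj0 : 0 ≤ j) (hjn : j < n) :
    (PySem.List.pyRange 0 m 1).Pairwise (fun a b => (a * n + j).toNat ≠ (b * n + j).toNat) := by
  rw [PySem.List.pyRange_one]
  apply List.pairwise_map.mpr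
  apply List.Pairwise.imp ?_ (List.pairwise_lt_range)
  intro a b hab
  have h1 : (0 + (a : Int)) * n + j < (0 + (b : Int)) * n + j := by
    have hab' : (a : Int) < (b : Int) := by exact_mod_cast hab
    nlinarith
  have h2 : 0 ≤ (0 + (a : Int)) * n + j := by
    have ha : 0 ≤ (a : Int) := Int.natCast_nonneg a
    nlinarith
  omega

theorem createNextDownMap_eq (m n : Int) (matrix : List (List Bool)) :
    createNextDownMap m n matrix = createNextDownMap_alt m n matrix := by
  unfold createNextDownMap createNextDownMap_alt
  apply PySem.List.foldl_congr_mem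
  intro acc j hj
  have hj' := PySem.List.mem_pyRange_one.mp hj
  have hrev : PySem.List.pyRange (m - 1) (-1) (-1) = (PySem.List.pyRange 0 m 1).reverse := by
    rw [PySem.List.pyRange_neg_one_eq_reverse]; norm_num
  rw [hrev, List.foldl_reverse]
  rw [colA_notfound n j matrix _ acc (pyRange_rows_pairwise m n j hj'.1 hj'.2)]
  rfl

-- ===== VERDICT (by name: the statement is the Claim_ definition above) =====
theorem createNextDownMap_spec : Claim_equal_createNextDownMap := by
  intro m n matrix _ _
  unfold Spec_createNextDownMap
  exact createNextDownMap_eq m n matrix
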